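-- pv_equiv track=rewrite | github.com/JH-TT/Coding_Practice | BaekJoon/DFS_BFS/169199.py | solution
-- ===== SOURCE A (Python) =====
-- from collections import deque
--
-- def solution(board):
--     answer = 0
--     # 상하좌우 : 0123
--     for i in range(len(board)):
--         for j in range(len(board[0])):
--             if board[i][j] == "R":
--                 start = [i, j]
--     q = deque()
--     visit = [[0] * len(board[0]) for _ in range(len(board))]
--     q.append((0, start))
--     while q:
--         cnt, p = q.popleft()
--         a, b = p
--         if board[a][b] == "G":
--             return cnt
--         for i in range(4):
--             if visit[a][b]:
--                 continue
--             nex = move(a, b, i, board)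
--             q.append((cnt+1, nex))
--         visit[a][b] = 1
--
--     return -1
--
-- def move(x, y, t, b):
--     if t == 0:
--         while x > 0:
--             if b[x-1][y] == "D":
--                 break
--             x -= 1
--     elif t == 1:
--         while x < len(b)-1:
--             if b[x+1][y] == "D":
--                 break
--             x += 1
--     elif t == 2:
--         while y > 0:
--             if b[x][y-1] == "D":
--                 break
--             y -= 1
--     else:
--         while y < len(b[0])-1:
--             if b[x][y+1] == "D":
--                 break
--             y += 1
--     return [x, y]
-- ===== SOURCE B (Python) =====
-- from collections import deque
--
-- def solution(board):
--     h, w = len(board), len(board[0])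
--
--     def up(i, j):
--         r = 0
--         for k in range(1, i + 1):
--             if board[k - 1][j] == "D":
--                 r = k
--         return (r, j)
--
--     def down(i, j):
--         r = h - 1
--         for k in range(h - 2, i - 1, -1):
--             if board[k + 1][j] == "D":
--                 r = k
--         return (r, j)
--
--     def left(i, j):
--         c = 0
--         for k in range(1, j + 1):
--             if board[i][k - 1] == "D":
--                 c = k
--         return (i, c)
--
--     def right(i, j):
--         c = w - 1
--         for k in range(w - 2, j - 1, -1):
--             if board[i][k + 1] == "D":
--                 c = k
--         return (i, c)
--
--     adj = [[[up(i, j), down(i, j), left(i, j), right(i, j)]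
--             for j in range(w)] for i in range(h)]
--
--     start = None
--     for i in range(h):
--         for j in range(w):
--             if board[i][j] == "R":
--                 start = (i, j)
--
--     seen = set()
--     q = deque([(0, start)])
--     while q:
--         cnt, p = q.popleft()
--         a, b = p
--         if board[a][b] == "G":
--             return cnt
--         if p not in seen:
--             seen.add(p)
--             for nxt in adj[a][b]:
--                 q.append((cnt + 1, nxt))
--     return -1
-- ===== Notes on version B (the rewrite author's own statement) =====
-- stated objective: alternative
-- what changed: B precomputes a per-cell adjacency table of the four roll destinations via last-blocker scans over each row/column prefix (instead of A's on-demand step-by-step sliding inside the BFS) and runs the BFS over that table with a visited set checked before expanding, instead of A's 0/1 grid consulted inside the direction loop.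
import Mathlib
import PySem

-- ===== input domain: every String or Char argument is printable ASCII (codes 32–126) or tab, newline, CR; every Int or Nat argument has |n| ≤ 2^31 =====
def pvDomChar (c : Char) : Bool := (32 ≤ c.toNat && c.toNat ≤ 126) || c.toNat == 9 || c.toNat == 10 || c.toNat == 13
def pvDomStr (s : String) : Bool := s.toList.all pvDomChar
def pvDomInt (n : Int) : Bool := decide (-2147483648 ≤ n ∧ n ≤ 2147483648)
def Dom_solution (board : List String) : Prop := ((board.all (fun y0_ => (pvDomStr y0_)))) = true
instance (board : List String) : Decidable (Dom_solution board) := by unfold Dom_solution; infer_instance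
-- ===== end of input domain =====

-- B re-implements the same BFS with a precomputed adjacency table (per-cell roll destinations found
-- by last-blocker scans instead of step-by-step sliding) and a visited set checked before expanding;
-- objective: alternative decomposition, same exact return value.

-- ===== PORT A =====

-- board[i][j] (only evaluated in range on admitted inputs; ' ' is an arbitrary total default)
def bGet (b : List String) (i j : Nat) : Char := ((b.getD i "").toList).getD j ' '

-- move, t == 0: while x > 0: if b[x-1][y] == "D": break; x -= 1
def moveUp (b : List String) (y : Nat) : Nat → Nat
  | 0 => 0
  | x + 1 => if bGet b x y = 'D' then x + 1 else moveUp b y x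

-- move, t == 1: while x < len(b)-1: if b[x+1][y] == "D": break; x += 1   (h1 = len(b)-1)
def moveDown (b : List String) (y h1 x : Nat) : Nat :=
  if _hx : x < h1 then (if bGet b (x + 1) y = 'D' then x else moveDown b y h1 (x + 1)) else x
  termination_by h1 - x
  decreasing_by omega

-- move, t == 2: while y > 0: if b[x][y-1] == "D": break; y -= 1
def moveLeft (b : List String) (x : Nat) : Nat → Nat
  | 0 => 0
  | y + 1 => if bGet b x y = 'D' then y + 1 else moveLeft b x y

-- move, else: while y < len(b[0])-1: if b[x][y+1] == "D": break; y += 1   (w1 = len(b[0])-1)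
def moveRight (b : List String) (x w1 y : Nat) : Nat :=
  if _hy : y < w1 then (if bGet b x (y + 1) = 'D' then y else moveRight b x w1 (y + 1)) else y
  termination_by w1 - y
  decreasing_by omega

def move (x y t : Nat) (b : List String) : Nat × Nat :=
  if t = 0 then (moveUp b y x, y)
  else if t = 1 then (moveDown b y (b.length - 1) x, y)
  else if t = 2 then (x, moveLeft b x y)
  else (x, moveRight b x ((b.getD 0 "").toList.length - 1) y)

-- the start-finding double loop (keeps the LAST 'R')
def findRA (b : List String) (h w : Nat) : Option (Nat × Nat) :=
  (List.range h).foldl (fun s i =>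
    (List.range w).foldl (fun s j => if bGet b i j = 'R' then some (i, j) else s) s) none

def vget (v : List (List Nat)) (a b : Nat) : Nat := (v.getD a []).getD b 0
def vset (v : List (List Nat)) (a b : Nat) : List (List Nat) := v.modify a (fun row => row.set b 1)

-- the while-q loop; fuel 4*h*w+2 strictly exceeds the number of dequeues Python can perform
def loopA (bd : List String) : Nat → List (List Nat) → List (Nat × Nat × Nat) → Int
  | 0, _, _ => -1
  | _ + 1, _, [] => -1
  | f + 1, v, (cnt, a, b) :: rest =>
    if bGet bd a b = 'G' then (cnt : Int)
    else loopA bd f (vset v a b)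
      ((List.range 4).foldl
        (fun q i => if vget v a b = 1 then q else q ++ [(cnt + 1, move a b i bd)]) rest)

def solution (board : List String) : Int :=
  match findRA board board.length ((board.getD 0 "").toList.length) with
  | none => 0  -- Python raises (NameError: start) here; excluded by Pre_solution
  | some st =>
    loopA board (4 * board.length * ((board.getD 0 "").toList.length) + 2)
      ((List.range board.length).map (fun _ => List.replicate ((board.getD 0 "").toList.length) 0))
      [(0, st.1, st.2)]

-- ===== PORT B =====

-- destination of an upward roll from (i,j): last blocker below a 'D' scanned forward, else row 0
def slideUp (bd : List String) (j i : Nat) : Nat × Nat :=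
  ((List.range' 1 i).foldl (fun r k => if bGet bd (k - 1) j = 'D' then k else r) 0, j)

def slideDown (bd : List String) (h j i : Nat) : Nat × Nat :=
  ((List.range' i (h - 1 - i)).reverse.foldl (fun r k => if bGet bd (k + 1) j = 'D' then k else r) (h - 1), j)

def slideLeft (bd : List String) (i j : Nat) : Nat × Nat :=
  (i, (List.range' 1 j).foldl (fun c k => if bGet bd i (k - 1) = 'D' then k else c) 0)

def slideRight (bd : List String) (w i j : Nat) : Nat × Nat :=
  (i, (List.range' j (w - 1 - j)).reverse.foldl (fun c k => if bGet bd i (k + 1) = 'D' then k else c) (w - 1))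

-- adjacency table: the four roll destinations of every cell, computed once
def adjTable (bd : List String) (h w : Nat) : List (List (List (Nat × Nat))) :=
  (List.range h).map (fun i => (List.range w).map (fun j =>
    [slideUp bd j i, slideDown bd h j i, slideLeft bd i j, slideRight bd w i j]))

def adjGet (t : List (List (List (Nat × Nat)))) (a b : Nat) : List (Nat × Nat) := (t.getD a []).getD b []

def findRB (b : List String) (h w : Nat) : Option (Nat × Nat) :=
  (List.range h).foldl (fun s i =>
    (List.range w).foldl (fun s j => if bGet b i j = 'R' then some (i, j) else s) s) none

-- BFS over the table with a visited set
def loopB (bd : List String) (adj : List (List (List (Nat × Nat)))) :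
    Nat → PySem.Set (Nat × Nat) → List (Nat × Nat × Nat) → Int
  | 0, _, _ => -1
  | _ + 1, _, [] => -1
  | f + 1, seen, (cnt, p) :: rest =>
    if bGet bd p.1 p.2 = 'G' then (cnt : Int)
    else if PySem.Set.contains seen p then loopB bd adj f seen rest
    else loopB bd adj f (PySem.Set.add seen p)
      (rest ++ (adjGet adj p.1 p.2).map (fun n => (cnt + 1, n)))

def solution_alt (board : List String) : Int :=
  match findRB board board.length ((board.getD 0 "").toList.length) with
  | none => 0  -- Python raises (TypeError unpacking None) here; excluded by Pre_solution
  | some st =>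
    loopB board (adjTable board board.length ((board.getD 0 "").toList.length))
      (4 * board.length * ((board.getD 0 "").toList.length) + 2) PySem.Set.empty [(0, st.1, st.2)]

-- ===== PRECONDITION & SPEC =====
-- Pre_ admits exactly the boards A returns on: every row at least as long as row 0 (the start scan
-- reads board[i][j] for all j < len(board[0])) and an 'R' in those first len(board[0]) columns
-- (otherwise Python raises NameError: 'start').
def Pre_solution (board : List String) : Prop :=
  (∀ s ∈ board, (board.getD 0 "").toList.length ≤ s.toList.length) ∧
  (∃ i < board.length, ∃ j < (board.getD 0 "").toList.length, bGet board i j = 'R')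
instance (board : List String) : Decidable (Pre_solution board) := by unfold Pre_solution; infer_instance

def pvWitness_solution : List String := ["RG"]

def Spec_solution (board : List String) (out : Int) : Prop := out = solution_alt board
instance (board : List String) (out : Int) : Decidable (Spec_solution board out) := by unfold Spec_solution; infer_instance

-- ===== CLAIM (what is proved, stated in full; the proofs are below) =====
def Claim_equal_solution : Prop := ∀ (board : List String), Dom_solution board → Pre_solution board → Spec_solution board (solution board)

-- ===== LEMMAS AND PROOFS =====

-- the slide-by-scan destinations equal A's step-by-step slides
lemma up_aux (bd : List String) (j : Nat) : ∀ i : Nat,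
    (List.range' 1 i).foldl (fun r k => if bGet bd (k - 1) j = 'D' then k else r) 0 = moveUp bd j i := by
  intro i
  induction i with
  | zero => simp [moveUp]
  | succ n ih =>
    rw [List.range'_concat, List.foldl_append]
    simp only [List.foldl, ih]
    have h1 : 1 + 1 * n - 1 = n := by omega
    have h2 : 1 + 1 * n = n + 1 := by omega
    rw [h1, h2, moveUp]

lemma slideUp_eq (bd : List String) (j i : Nat) : slideUp bd j i = (moveUp bd j i, j) := by
  unfold slideUp; rw [up_aux]

lemma down_aux (bd : List String) (j h1 : Nat) : ∀ (n i : Nat), i + n = h1 →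
    (List.range' i n).reverse.foldl (fun r k => if bGet bd (k + 1) j = 'D' then k else r) h1 =
      moveDown bd j h1 i := by
  intro n
  induction n with
  | zero =>
    intro i hi
    have hih : i = h1 := by omega
    subst hih
    rw [moveDown]
    simp
  | succ n ih =>
    intro i hi
    rw [List.range'_succ, List.reverse_cons, List.foldl_append]
    simp only [List.foldl]
    rw [ih (i + 1) (by omega)]
    conv_rhs => rw [moveDown]
    rw [dif_pos (show i < h1 by omega)]

lemma slideDown_eq (bd : List String) (h j i : Nat) (hi : i ≤ h - 1) :
    slideDown bd h j i = (moveDown bd j (h - 1) i, j) := by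
  unfold slideDown
  rw [down_aux bd j (h - 1) (h - 1 - i) i (by omega)]

lemma left_aux (bd : List String) (i : Nat) : ∀ j : Nat,
    (List.range' 1 j).foldl (fun c k => if bGet bd i (k - 1) = 'D' then k else c) 0 = moveLeft bd i j := by
  intro j
  induction j with
  | zero => simp [moveLeft]
  | succ n ih =>
    rw [List.range'_concat, List.foldl_append]
    simp only [List.foldl, ih]
    have h1 : 1 + 1 * n - 1 = n := by omega
    have h2 : 1 + 1 * n = n + 1 := by omega
    rw [h1, h2, moveLeft]

lemma slideLeft_eq (bd : List String) (i j : Nat) : slideLeft bd i j = (i, moveLeft bd i j) := by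
  unfold slideLeft; rw [left_aux]

lemma right_aux (bd : List String) (i w1 : Nat) : ∀ (n y : Nat), y + n = w1 →
    (List.range' y n).reverse.foldl (fun c k => if bGet bd i (k + 1) = 'D' then k else c) w1 =
      moveRight bd i w1 y := by
  intro n
  induction n with
  | zero =>
    intro y hy
    have hih : y = w1 := by omega
    subst hih
    rw [moveRight]
    simp
  | succ n ih =>
    intro y hy
    rw [List.range'_succ, List.reverse_cons, List.foldl_append]
    simp only [List.foldl]
    rw [ih (y + 1) (by omega)]
    conv_rhs => rw [moveRight]
    rw [dif_pos (show y < w1 by omega)]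

lemma slideRight_eq (bd : List String) (w i j : Nat) (hj : j ≤ w - 1) :
    slideRight bd w i j = (i, moveRight bd i (w - 1) j) := by
  unfold slideRight
  rw [right_aux bd i (w - 1) (w - 1 - j) j (by omega)]

lemma adjGet_adjTable (bd : List String) (h w a b : Nat) (ha : a < h) (hb : b < w) :
    adjGet (adjTable bd h w) a b =
      [slideUp bd b a, slideDown bd h b a, slideLeft bd a b, slideRight bd w a b] := by
  simp [adjGet, adjTable, List.getD_eq_getElem?_getD, ha, hb]

-- combined: the table row of an in-range cell is exactly A's four move results
lemma adjGet_eq_moves (bd : List String) (a b : Nat) (ha : a < bd.length)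
    (hb : b < (bd.getD 0 "").toList.length) :
    adjGet (adjTable bd bd.length ((bd.getD 0 "").toList.length)) a b =
      [move a b 0 bd, move a b 1 bd, move a b 2 bd, move a b 3 bd] := by
  rw [adjGet_adjTable bd _ _ a b ha hb]
  rw [slideUp_eq, slideDown_eq _ _ _ _ (by omega), slideLeft_eq, slideRight_eq _ _ _ _ (by omega)]
  simp [move]

-- range preservation
lemma moveUp_le (bd : List String) (y x : Nat) : moveUp bd y x ≤ x := by
  induction x with
  | zero => simp [moveUp]
  | succ n ih =>
    rw [moveUp]
    split
    · exact le_refl _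
    · omega

lemma moveDown_le (bd : List String) (y h1 : Nat) : ∀ (n x : Nat), x + n = h1 → moveDown bd y h1 x ≤ h1 := by
  intro n
  induction n with
  | zero =>
    intro x hx
    rw [moveDown]
    simp [show ¬ x < h1 by omega]
    omega
  | succ n ih =>
    intro x hx
    rw [moveDown]
    rw [dif_pos (show x < h1 by omega)]
    split
    · omega
    · exact ih (x + 1) (by omega)

lemma moveLeft_le (bd : List String) (x y : Nat) : moveLeft bd x y ≤ y := by
  induction y with
  | zero => simp [moveLeft]
  | succ n ih =>
    rw [moveLeft]
    split
    · exact le_refl _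
    · omega

lemma moveRight_le (bd : List String) (x w1 : Nat) : ∀ (n y : Nat), y + n = w1 → moveRight bd x w1 y ≤ w1 := by
  intro n
  induction n with
  | zero =>
    intro y hy
    rw [moveRight]
    simp [show ¬ y < w1 by omega]
    omega
  | succ n ih =>
    intro y hy
    rw [moveRight]
    rw [dif_pos (show y < w1 by omega)]
    split
    · omega
    · exact ih (y + 1) (by omega)

lemma move_range (bd : List String) (a b t : Nat) (ha : a < bd.length)
    (hb : b < (bd.getD 0 "").toList.length) :
    (move a b t bd).1 < bd.length ∧ (move a b t bd).2 < (bd.getD 0 "").toList.length := by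
  unfold move
  split_ifs
  · exact ⟨lt_of_le_of_lt (moveUp_le bd b a) ha, hb⟩
  · refine ⟨?_, hb⟩
    have := moveDown_le bd b (bd.length - 1) (bd.length - 1 - a) a (by omega)
    omega
  · exact ⟨ha, lt_of_le_of_lt (moveLeft_le bd a b) hb⟩
  · refine ⟨ha, ?_⟩
    have := moveRight_le bd a ((bd.getD 0 "").toList.length - 1)
      ((bd.getD 0 "").toList.length - 1 - b) b (by omega)
    omega

-- visit-grid shape and lookup/update facts
def VShape (v : List (List Nat)) (h w : Nat) : Prop :=
  v.length = h ∧ ∀ x, x < h → (v.getD x []).length = w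

lemma getD_vset (v : List (List Nat)) (a b x : Nat) (ha : a < v.length) :
    (vset v a b).getD x [] = if x = a then (v.getD a []).set b 1 else v.getD x [] := by
  unfold vset
  rw [List.getD_eq_getElem?_getD, List.getElem?_modify]
  by_cases hx : x = a
  · subst hx
    rw [if_pos rfl, List.getElem?_eq_getElem ha]
    simp [List.getD_eq_getElem?_getD, List.getElem?_eq_getElem ha]
  · rw [if_neg hx]
    have hax : a ≠ x := fun hc => hx hc.symm
    simp [List.getD_eq_getElem?_getD, hax]

lemma vshape_vset (v : List (List Nat)) (h w a b : Nat) (hv : VShape v h w)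
    (ha : a < h) (_hb : b < w) : VShape (vset v a b) h w := by
  obtain ⟨hl, hr⟩ := hv
  refine ⟨by simpa [vset] using hl, ?_⟩
  intro x hx
  rw [getD_vset v a b x (by omega)]
  split
  · next hxa => subst hxa; rw [List.length_set]; exact hr x hx
  · exact hr x hx

lemma vget_vset (v : List (List Nat)) (h w a b x y : Nat) (hv : VShape v h w)
    (ha : a < h) (hb : b < w) :
    vget (vset v a b) x y = if x = a ∧ y = b then 1 else vget v x y := by
  obtain ⟨hl, hr⟩ := hv
  unfold vget
  rw [getD_vset v a b x (by omega)]
  by_cases hx : x = a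
  · subst hx
    rw [if_pos rfl]
    by_cases hy : y = b
    · subst hy
      rw [if_pos ⟨rfl, rfl⟩]
      have hlen : y < (v.getD x []).length := by rw [hr x ha]; exact hb
      rw [List.getD_eq_getElem?_getD, List.getElem?_set_self hlen]
      simp
    · rw [if_neg (fun hc => hy hc.2)]
      simp [List.getD_eq_getElem?_getD,
        List.getElem?_set_ne (show b ≠ y from fun hc => hy hc.symm)]
  · rw [if_neg hx, if_neg (fun hc => hx hc.1)]

lemma vshape_init (h w : Nat) : VShape ((List.range h).map (fun _ => List.replicate w 0)) h w := by
  refine ⟨by simp, ?_⟩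
  intro x hx
  rw [List.getD_eq_getElem?_getD]
  simp [hx]

lemma vget_init (h w x y : Nat) : vget ((List.range h).map (fun _ => List.replicate w 0)) x y = 0 := by
  have hrep : (List.range h).map (fun _ => List.replicate w 0) = List.replicate h (List.replicate w 0) := by
    rw [List.eq_replicate_iff]
    constructor
    · simp
    · intro b hb
      rcases List.mem_map.mp hb with ⟨_, _, rfl⟩
      rfl
  unfold vget
  rw [hrep]
  have houter : (List.replicate h (List.replicate w 0)).getD x [] =
      if x < h then List.replicate w 0 else [] := by
    rw [List.getD_eq_getElem?_getD, List.getElem?_replicate]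
    split <;> simp
  rw [houter]
  split
  · rw [List.getD_eq_getElem?_getD, List.getElem?_replicate]
    split <;> simp
  · simp

-- the two BFS loops agree step for step
lemma loop_eq (bd : List String) :
    ∀ (f : Nat) (v : List (List Nat)) (seen : PySem.Set (Nat × Nat)) (q : List (Nat × Nat × Nat)),
      VShape v bd.length ((bd.getD 0 "").toList.length) →
      (∀ x y, x < bd.length → y < (bd.getD 0 "").toList.length → (vget v x y = 1 ↔ (x, y) ∈ seen)) →
      (∀ e ∈ q, e.2.1 < bd.length ∧ e.2.2 < (bd.getD 0 "").toList.length) →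
      loopA bd f v q = loopB bd (adjTable bd bd.length ((bd.getD 0 "").toList.length)) f seen q := by
  intro f
  induction f with
  | zero => intro v seen q _ _ _; rfl
  | succ f ih =>
    intro v seen q hv hrel hq
    cases q with
    | nil => rfl
    | cons e rest =>
      obtain ⟨cnt, a, b⟩ := e
      have hab := hq (cnt, a, b) (by simp)
      have ha : a < bd.length := hab.1
      have hb : b < (bd.getD 0 "").toList.length := hab.2
      simp only [loopA, loopB]
      by_cases hg : bGet bd a b = 'G'
      · simp [hg]
      · rw [if_neg hg, if_neg hg]
        have hrest : ∀ e ∈ rest, e.2.1 < bd.length ∧ e.2.2 < (bd.getD 0 "").toList.length :=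
          fun e he => hq e (by simp [he])
        by_cases hvis : vget v a b = 1
        · have hmem : (a, b) ∈ seen := (hrel a b ha hb).1 hvis
          have hcont : PySem.Set.contains seen (a, b) = true := by simp [PySem.Set.contains_eq_listContains, hmem]
          rw [if_pos hcont]
          have hfold : (List.range 4).foldl
              (fun q i => if vget v a b = 1 then q else q ++ [(cnt + 1, move a b i bd)]) rest = rest := by
            simp [hvis]
          rw [hfold]
          apply ih (vset v a b) seen rest (vshape_vset v _ _ a b hv ha hb) ?_ hrest
          intro x y hx hy
          rw [vget_vset v _ _ a b x y hv ha hb]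
          split
          · next hxy =>
            obtain ⟨rfl, rfl⟩ := hxy
            simp [hmem]
          · exact hrel x y hx hy
        · have hmem : (a, b) ∉ seen := fun hm => hvis ((hrel a b ha hb).2 hm)
          have hcont : ¬ PySem.Set.contains seen (a, b) = true := by
            simp [PySem.Set.contains_eq_listContains]
            exact hmem
          rw [if_neg hcont]
          have hfold : (List.range 4).foldl
              (fun q i => if vget v a b = 1 then q else q ++ [(cnt + 1, move a b i bd)]) rest =
              rest ++ [(cnt + 1, move a b 0 bd), (cnt + 1, move a b 1 bd),
                (cnt + 1, move a b 2 bd), (cnt + 1, move a b 3 bd)] := by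
            have h4 : List.range 4 = [0, 1, 2, 3] := rfl
            rw [h4]
            simp [List.foldl, hvis]
          rw [hfold, adjGet_eq_moves bd a b ha hb]
          simp only [List.map]
          apply ih (vset v a b) (PySem.Set.add seen (a, b)) _
            (vshape_vset v _ _ a b hv ha hb) ?_ ?_
          · intro x y hx hy
            rw [vget_vset v _ _ a b x y hv ha hb, PySem.Set.mem_add]
            by_cases hxy : x = a ∧ y = b
            · obtain ⟨rfl, rfl⟩ := hxy
              simp
            · rw [if_neg hxy]
              have hne : ((x, y) : Nat × Nat) ≠ (a, b) := by
                simp only [ne_eq, Prod.mk.injEq]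
                exact fun hc => hxy hc
              rw [hrel x y hx hy]
              simp [hne]
          · intro e he
            rcases List.mem_append.mp he with h1 | h2
            · exact hrest e h1
            · simp only [List.mem_cons] at h2
              rcases h2 with rfl | rfl | rfl | rfl | h
              · exact move_range bd a b 0 ha hb
              · exact move_range bd a b 1 ha hb
              · exact move_range bd a b 2 ha hb
              · exact move_range bd a b 3 ha hb
              · cases h

-- a found start lies in range
lemma findR_inner_lt (bd : List String) (h w i : Nat) (hi : i < h) :
    ∀ (l : List Nat) (s : Option (Nat × Nat)),
      (∀ p, s = some p → p.1 < h ∧ p.2 < w) → (∀ j ∈ l, j < w) →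
      ∀ p, l.foldl (fun s j => if bGet bd i j = 'R' then some (i, j) else s) s = some p →
        p.1 < h ∧ p.2 < w := by
  intro l
  induction l with
  | nil => intro s hs _ p hp; exact hs p hp
  | cons j t ihl =>
    intro s hs hl p hp
    simp only [List.foldl_cons] at hp
    refine ihl _ ?_ (fun x hx => hl x (List.mem_cons_of_mem _ hx)) p hp
    intro p' hp'
    split at hp'
    · injection hp' with hpe
      subst hpe
      exact ⟨hi, hl j (List.mem_cons_self)⟩
    · exact hs p' hp'

lemma findR_lt (bd : List String) (h w : Nat) (p : Nat × Nat)
    (hp : findRA bd h w = some p) : p.1 < h ∧ p.2 < w := by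
  unfold findRA at hp
  have main : ∀ (l : List Nat) (s : Option (Nat × Nat)),
      (∀ p, s = some p → p.1 < h ∧ p.2 < w) → (∀ i ∈ l, i < h) →
      ∀ p, l.foldl (fun s i =>
          (List.range w).foldl (fun s j => if bGet bd i j = 'R' then some (i, j) else s) s) s = some p →
        p.1 < h ∧ p.2 < w := by
    intro l
    induction l with
    | nil => intro s hs _ p hp; exact hs p hp
    | cons i t ihl =>
      intro s hs hl p hp
      simp only [List.foldl_cons] at hp
      refine ihl _ ?_ (fun x hx => hl x (List.mem_cons_of_mem _ hx)) p hp
      intro p' hp'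
      exact findR_inner_lt bd h w i (hl i (List.mem_cons_self)) (List.range w) s hs
        (fun j hj => List.mem_range.mp hj) p' hp'
  exact main (List.range h) none (fun p hp => by cases hp) (fun i hi => List.mem_range.mp hi) p hp

-- ===== VERDICT (by name: the statement is the Claim_ definition above) =====
theorem solution_spec : Claim_equal_solution := by
  intro board _ _
  unfold Spec_solution
  show solution board = solution_alt board
  unfold solution solution_alt
  have hfind : findRB board board.length ((board.getD 0 "").toList.length) =
      findRA board board.length ((board.getD 0 "").toList.length) := rfl
  rw [hfind]
  cases hR : findRA board board.length ((board.getD 0 "").toList.length) with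
  | none => rfl
  | some st =>
    have hst := findR_lt board _ _ st hR
    exact loop_eq board _ _ _ _ (vshape_init _ _)
      (fun x y hx hy => by rw [vget_init]; simp [PySem.Set.empty])
      (fun e he => by
        simp only [List.mem_singleton] at he
        subst he
        exact hst)
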